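-- pv_equiv track=rewrite | github.com/RegitzeSdun/recommender-engine | build/lib/recommender_engine/utils/shared_functions.py | find_match_sentence_indexes
-- ===== SOURCE A (Python) =====
-- from typing import List, Dict, Tuple
--
-- def find_match_sentence_indexes(text_with_tag: str) -> List[dict]:
--     """
--     From space separated texts with <b> tags around the search terms,
--     returns the indexes of the search terms.
--     :param text_with_tag: Row text with search term tags
--     :return: List of indexes in dictionary [{"start": 1, "stop": 2}]
--     """
--     # Find all indexes begin with <b> (search term matches)
--     search_term_indexes = [
--         index
--         for index, word in enumerate(text_with_tag.split())
--         if word.startswith("<b>")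
--     ]
--
--     # If no match, return empty list
--     if not search_term_indexes:
--         return []
--
--     # Iterate over search term indexes, add start and stop index of the concurrent numbers to the list
--     index_list = []
--     one_search_term_index = {"start": search_term_indexes[0]}
--     previous_index = search_term_indexes[0]
--     for index in search_term_indexes[1:]:
--         if index != previous_index + 1:
--             one_search_term_index["stop"] = previous_index
--             index_list.append(one_search_term_index)
--             one_search_term_index = {"start": index}
--         previous_index = index
--
--     # Add final stop to the index list
--     one_search_term_index["stop"] = previous_index
--     index_list.append(one_search_term_index)
--     return index_list
-- ===== SOURCE B (Python) =====
-- def find_match_sentence_indexes(text_with_tag: str):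
--     """Single pass over the words with an in_run/start state machine."""
--     result = []
--     in_run = False
--     start = 0
--     last = -1
--     for index, word in enumerate(text_with_tag.split()):
--         match = word.startswith("<b>")
--         if match and not in_run:
--             in_run = True
--             start = index
--         elif not match and in_run:
--             result.append({"start": start, "stop": index - 1})
--             in_run = False
--         last = index
--     if in_run:
--         result.append({"start": start, "stop": last})
--     return result
-- ===== Notes on version B (the rewrite author's own statement) =====
-- stated objective: simpler
-- what changed: Replaces A's filtered-index list plus gap-check second pass with a single state-machine pass over the enumerated words that tracks in_run/start and emits a range on each falling edge.
import Mathlib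
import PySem

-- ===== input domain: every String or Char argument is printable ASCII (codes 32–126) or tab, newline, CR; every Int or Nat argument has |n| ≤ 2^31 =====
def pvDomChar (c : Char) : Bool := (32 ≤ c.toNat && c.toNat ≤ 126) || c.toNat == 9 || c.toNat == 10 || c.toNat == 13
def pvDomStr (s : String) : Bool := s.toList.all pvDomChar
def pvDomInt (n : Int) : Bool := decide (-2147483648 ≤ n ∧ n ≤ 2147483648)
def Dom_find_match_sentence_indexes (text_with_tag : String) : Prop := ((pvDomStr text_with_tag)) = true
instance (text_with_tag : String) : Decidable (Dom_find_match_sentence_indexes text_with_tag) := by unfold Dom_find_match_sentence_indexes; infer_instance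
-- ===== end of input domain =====

-- B replaces A's two-phase filtered-index + gap-check grouping by a single state-machine
-- pass over the enumerated words (objective: simpler).

-- ===== PORT A =====
-- A's loop body: state is (index_list, one_search_term_index, previous_index)
def pvStepA (st : List (List (String × Int)) × PySem.Dict String Int × Int) (index : Int) :
    List (List (String × Int)) × PySem.Dict String Int × Int :=
  let (index_list, one, prev) := st
  if index ≠ prev + 1 then
    (index_list ++ [(one.insert "stop" prev).items], PySem.Dict.empty.insert "start" index, index)
  else (index_list, one, index)

def find_match_sentence_indexes (text_with_tag : String) : List (List (String × Int)) :=
  -- [index for index, word in enumerate(text_with_tag.split()) if word.startswith("<b>")]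
  let search_term_indexes : List Int :=
    ((PySem.List.enumerate (PySem.Str.split₀ text_with_tag)).filter
      (fun p => PySem.Str.startswith p.2 "<b>")).map (·.1)
  match search_term_indexes with
  | [] => []
  | first :: rest =>
    let st := rest.foldl pvStepA ([], PySem.Dict.empty.insert "start" first, first)
    st.1 ++ [(st.2.1.insert "stop" st.2.2).items]

-- ===== PORT B =====
-- B's loop body: state is (result, in_run, start, last)
def pvStepB (st : List (List (String × Int)) × Bool × Int × Int) (p : Int × String) :
    List (List (String × Int)) × Bool × Int × Int :=
  let (result, in_run, start, _last) := st
  let m := PySem.Str.startswith p.2 "<b>"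
  if m && !in_run then (result, true, p.1, p.1)
  else if !m && in_run then
    (result ++ [[("start", start), ("stop", p.1 - 1)]], false, start, p.1)
  else (result, in_run, start, p.1)

def find_match_sentence_indexes_alt (text_with_tag : String) : List (List (String × Int)) :=
  let st := (PySem.List.enumerate (PySem.Str.split₀ text_with_tag)).foldl pvStepB ([], false, 0, -1)
  if st.2.1 then st.1 ++ [[("start", st.2.2.1), ("stop", st.2.2.2)]] else st.1

-- ===== PRECONDITION & SPEC =====
def Spec_find_match_sentence_indexes (text_with_tag : String) (out : List (List (String × Int))) : Prop := out = find_match_sentence_indexes_alt text_with_tag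
instance (text_with_tag : String) (out : List (List (String × Int))) : Decidable (Spec_find_match_sentence_indexes text_with_tag out) := by unfold Spec_find_match_sentence_indexes; infer_instance

-- ===== CLAIM (what is proved, stated in full; the proofs are below) =====
def Claim_equal_find_match_sentence_indexes : Prop := ∀ (text_with_tag : String), Dom_find_match_sentence_indexes text_with_tag → Spec_find_match_sentence_indexes text_with_tag (find_match_sentence_indexes text_with_tag)

-- ===== LEMMAS AND PROOFS =====

-- item list of the dict {"start": s, "stop": p}
def pvMk (p : Int × Int) : List (String × Int) := [("start", p.1), ("stop", p.2)]

-- predicate "word starts with <b>" in char-list form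
def pvB (w : String) : Bool := PySem.Chars.startswith w.toList ['<', 'b', '>']

-- indexes (counting from offset k) of the words starting with "<b>"
def pvF (k : Int) : List String → List Int
  | [] => []
  | w :: ws => if pvB w then k :: pvF (k+1) ws else pvF (k+1) ws

-- A's grouping of the index list into maximal consecutive runs
def pvGroup (s p : Int) : List Int → List (Int × Int)
  | [] => [(s, p)]
  | i :: rest => if i ≠ p + 1 then (s, p) :: pvGroup i i rest else pvGroup s i rest

-- B's state machine, abstractly (pend = pending run start)
def pvRuns (k : Int) (pend : Option Int) : List String → List (Int × Int)
  | [] => match pend with | none => [] | some s => [(s, k - 1)]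
  | w :: ws =>
    match pend, pvB w with
    | none, true => pvRuns (k+1) (some k) ws
    | none, false => pvRuns (k+1) none ws
    | some s, true => pvRuns (k+1) (some s) ws
    | some s, false => (s, k-1) :: pvRuns (k+1) none ws

theorem pvItems_eq (s p : Int) :
    ((PySem.Dict.empty.insert "start" s).insert "stop" p).items = pvMk (s, p) := by
  rfl

theorem pvStepB_eq (res : List (List (String × Int))) (in_run : Bool) (st l k : Int) (w : String) :
    pvStepB (res, in_run, st, l) (k, w) =
      (if pvB w && !in_run then (res, true, k, k)
       else if !(pvB w) && in_run then (res ++ [[("start", st), ("stop", k - 1)]], false, st, k)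
       else (res, in_run, st, k)) := rfl

theorem pvFilter_eq (ws : List String) : ∀ k : Int,
    (((PySem.List.enumerate ws k).filter (fun p => PySem.Str.startswith p.2 "<b>")).map (·.1))
      = pvF k ws := by
  induction ws with
  | nil => intro k; rfl
  | cons w ws ih =>
    intro k
    have hb : PySem.Str.startswith (k, w).2 "<b>" = pvB w := rfl
    rw [PySem.List.enumerate_cons, List.filter_cons, hb]
    cases hw : pvB w with
    | true => rw [if_pos rfl, List.map_cons, ih (k+1), pvF, hw, if_pos rfl]
    | false =>
      rw [if_neg (by simp), ih (k+1), pvF, hw, if_neg (by simp)]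

theorem pvAfold (rest : List Int) : ∀ (acc : List (List (String × Int))) (s p : Int),
    ((rest.foldl pvStepA (acc, PySem.Dict.empty.insert "start" s, p)).1
      ++ [(((rest.foldl pvStepA (acc, PySem.Dict.empty.insert "start" s, p)).2.1).insert "stop"
            (rest.foldl pvStepA (acc, PySem.Dict.empty.insert "start" s, p)).2.2).items])
    = acc ++ (pvGroup s p rest).map pvMk := by
  induction rest with
  | nil => intro acc s p; simp [pvGroup, pvItems_eq]
  | cons i rest ih =>
    intro acc s p
    by_cases h : i = p + 1
    · simp only [List.foldl_cons, pvStepA, h, if_neg (by omega : ¬ (p + 1 ≠ p + 1)), pvGroup]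
      simpa using ih acc s (p + 1)
    · simp only [List.foldl_cons, pvStepA, if_pos (by omega : i ≠ p + 1), pvGroup]
      rw [ih, pvItems_eq]
      simp [pvMk, h]

theorem pvF_ge (ws : List String) : ∀ k x, x ∈ pvF k ws → k ≤ x := by
  induction ws with
  | nil => intro k x h; simp [pvF] at h
  | cons w ws ih =>
    intro k x h
    simp only [pvF] at h
    by_cases hw : pvB w = true
    · rw [if_pos hw] at h
      rcases List.mem_cons.mp h with h | h
      · omega
      · have := ih (k+1) x h; omega
    · rw [if_neg hw] at h
      have := ih (k+1) x h; omega

theorem pvLink (ws : List String) : ∀ k : Int,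
    (pvRuns k none ws = (match pvF k ws with | [] => [] | f :: rest => pvGroup f f rest))
    ∧ (∀ s, pvRuns k (some s) ws = pvGroup s (k-1) (pvF k ws)) := by
  induction ws with
  | nil => intro k; exact ⟨rfl, fun s => rfl⟩
  | cons w ws ih =>
    intro k
    cases hw : pvB w with
    | true =>
      constructor
      · simp only [pvRuns, pvF, hw, reduceIte]
        rw [(ih (k+1)).2 k]
        norm_num
      · intro s
        simp only [pvRuns, pvF, hw, reduceIte]
        rw [(ih (k+1)).2 s]
        simp only [pvGroup]
        rw [if_neg (by omega : ¬ (k ≠ (k-1) + 1))]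
        norm_num
    | false =>
      constructor
      · simp only [pvRuns, pvF, hw, Bool.false_eq_true, if_false]
        exact (ih (k+1)).1
      · intro s
        simp only [pvRuns, pvF, hw, Bool.false_eq_true, if_false]
        rw [(ih (k+1)).1]
        cases hF : pvF (k+1) ws with
        | nil => simp [pvGroup]
        | cons f rest =>
          have hf : k + 1 ≤ f := pvF_ge ws (k+1) f (by rw [hF]; exact List.mem_cons_self ..)
          simp only [pvGroup]
          rw [if_pos (by omega : f ≠ (k-1) + 1)]

theorem pvBfold (ws : List String) : ∀ (k : Int) (acc : List (List (String × Int))) (pend : Bool) (start : Int),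
    (let st := (PySem.List.enumerate ws k).foldl pvStepB (acc, pend, start, k - 1)
     if st.2.1 then st.1 ++ [[("start", st.2.2.1), ("stop", st.2.2.2)]] else st.1)
    = acc ++ (pvRuns k (if pend then some start else none) ws).map pvMk := by
  induction ws with
  | nil =>
    intro k acc pend start
    cases pend <;> simp [PySem.List.enumerate, pvRuns, pvMk]
  | cons w ws ih =>
    intro k acc pend start
    simp only [PySem.List.enumerate_cons, List.foldl_cons, pvStepB_eq]
    cases hw : pvB w with
    | true =>
      cases pend
      · -- match, not in run: start a run at k
        simp only [hw, Bool.not_false, Bool.and_true, reduceIte, pvRuns]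
        simpa using ih (k+1) acc true k
      · -- match, in run: keep going
        simp only [hw, Bool.not_true, Bool.and_false, Bool.false_eq_true, if_false,
          Bool.true_and, reduceIte, pvRuns]
        simpa using ih (k+1) acc true start
    | false =>
      cases pend
      · -- no match, not in run
        simp only [hw, Bool.false_and, Bool.not_false, Bool.false_eq_true, if_false,
          Bool.and_true, reduceIte, pvRuns]
        simpa using ih (k+1) acc false start
      · -- no match, in run: emit (start, k-1)
        simp only [hw, Bool.false_and, Bool.not_false, Bool.true_and, Bool.false_eq_true,
          if_false, reduceIte, pvRuns]
        simpa [pvMk] using ih (k+1) (acc ++ [[("start", start), ("stop", k - 1)]]) false start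

-- ===== VERDICT (by name: the statement is the Claim_ definition above) =====
theorem find_match_sentence_indexes_spec : Claim_equal_find_match_sentence_indexes := by
  intro t _
  unfold Spec_find_match_sentence_indexes find_match_sentence_indexes find_match_sentence_indexes_alt
  rw [pvFilter_eq]
  have hB := pvBfold (PySem.Str.split₀ t) 0 [] false 0
  norm_num at hB
  rw [hB, (pvLink (PySem.Str.split₀ t) 0).1]
  cases hF : pvF 0 (PySem.Str.split₀ t) with
  | nil => simp
  | cons f rest =>
    have := pvAfold rest [] f f
    simpa using this
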